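-- pv_equiv track=rewrite | github.com/pcdshub/pmps-ui | tooltips.py | get_ev_range_tooltip
-- ===== SOURCE A (Python) =====
-- from typing import Iterable
--
-- def preformatted(text: str) -> str:
--     """Return a rich text preformatted version of input."""
--     return f'<pre>{text}</pre>'
--
-- def get_ev_range_tooltip(bitmask: int, range_def: Iterable[int]) -> str:
--     """Return a suitable tooltip for an eV range bitmask."""
--     ok_bounds = []
--     bad_bounds = []
--     curr_ok_bound = None
--     curr_bad_bound = None
--     prev = 0
--
--     for bit, ev in enumerate(range_def):
--         ok = (bitmask >> bit) % 2
--         if ok: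
--             if curr_ok_bound is None:
--                 curr_ok_bound = (prev, ev)
--             else:
--                 curr_ok_bound = (curr_ok_bound[0], ev)
--             if curr_bad_bound is not None:
--                 bad_bounds.append(curr_bad_bound)
--                 curr_bad_bound = None
--         else:
--             if curr_bad_bound is None:
--                 curr_bad_bound = (prev, ev)
--             else:
--                 curr_bad_bound = (curr_bad_bound[0], ev)
--             if curr_ok_bound is not None:
--                 ok_bounds.append(curr_ok_bound)
--                 curr_ok_bound = None
--         prev = ev
--
--     if curr_ok_bound is not None:
--         ok_bounds.append(curr_ok_bound)
--     if curr_bad_bound is not None: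
--         bad_bounds.append(curr_bad_bound)
--
--     left_width = 0
--     right_width = 0
--     lines = []
--     if not bad_bounds or len(ok_bounds) < len(bad_bounds):
--         for left, right in ok_bounds:
--             left_width = max(left_width, len(str(left)))
--             right_width = max(right_width, len(str(right)))
--         for under, over in ok_bounds:
--             line = f'Allow {under:{left_width}}eV &lt; energy &lt; {over:{right_width}}eV'
--             lines.append(line)
--     else:
--         for left, right in bad_bounds:
--             left_width = max(left_width, len(str(left)))
--             right_width = max(right_width, len(str(right)))
--         for under, over in bad_bounds:
--             line = f'Block {under:{left_width}}eV &lt; energy &lt; {over:{right_width}}eV'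
--             lines.append(line)
--     return preformatted('\n'.join(lines))
-- ===== SOURCE B (Python) =====
-- def preformatted(text: str) -> str:
--     """Return a rich text preformatted version of input."""
--     return f'<pre>{text}</pre>'
--
--
-- def get_ev_range_tooltip(bitmask: int, range_def) -> str:
--     """Return a suitable tooltip for an eV range bitmask."""
--     evs = list(range_def)
--     flags = [(bitmask >> bit) % 2 for bit in range(len(evs))]
--     prevs = [0] + evs[:-1]
--     # A run starts where the flag differs from its left neighbour and ends
--     # where it differs from its right neighbour; pair starts with ends.
--     is_start = [True] + [f != g for f, g in zip(flags[1:], flags)]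
--     is_end = is_start[1:] + [True]
--     run_starts = [(lo, f) for lo, s, f in zip(prevs, is_start, flags) if s]
--     run_ends = [hi for hi, e in zip(evs, is_end) if e]
--     runs = [(lo, hi, f) for (lo, f), hi in zip(run_starts, run_ends)]
--
--     ok_count = sum(f for _, _, f in runs)
--     bad_count = len(runs) - ok_count
--     if bad_count == 0 or ok_count < bad_count:
--         word, want = 'Allow', 1
--     else:
--         word, want = 'Block', 0
--     bounds = [(lo, hi) for lo, hi, f in runs if f == want]
--
--     left_width = max((len(str(lo)) for lo, _ in bounds), default=0)
--     right_width = max((len(str(hi)) for _, hi in bounds), default=0)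
--     lines = [f'{word} {lo:{left_width}}eV &lt; energy &lt; {hi:{right_width}}eV'
--              for lo, hi in bounds]
--     return preformatted('\n'.join(lines))
-- ===== Notes on version B (the rewrite author's own statement) =====
-- stated objective: alternative
-- what changed: Replaces A's single-pass state machine with four mutable bound/current-run variables by boundary detection: run starts/ends are found by comparing the flag list against a shifted copy, starts are paired with ends via zip, the allowed-run count is obtained arithmetically as the sum of 0/1 flags, and only the selected bounds list is ever materialised.
import Mathlib
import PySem

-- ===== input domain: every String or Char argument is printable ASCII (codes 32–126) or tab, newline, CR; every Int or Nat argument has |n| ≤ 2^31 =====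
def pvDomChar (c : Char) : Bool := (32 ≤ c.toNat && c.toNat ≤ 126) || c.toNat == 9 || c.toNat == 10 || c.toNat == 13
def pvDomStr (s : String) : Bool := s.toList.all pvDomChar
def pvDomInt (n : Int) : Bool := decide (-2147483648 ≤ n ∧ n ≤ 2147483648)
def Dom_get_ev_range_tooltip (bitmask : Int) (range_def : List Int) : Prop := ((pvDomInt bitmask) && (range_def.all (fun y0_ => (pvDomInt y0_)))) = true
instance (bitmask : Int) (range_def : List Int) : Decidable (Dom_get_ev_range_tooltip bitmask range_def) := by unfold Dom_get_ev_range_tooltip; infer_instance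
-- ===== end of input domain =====

-- B replaces A's one-pass state machine by boundary detection: it marks run starts/ends by
-- comparing the flag list with a shifted copy, pairs them with zip, counts allowed runs
-- arithmetically and materialises only the chosen bounds list; same output as A.

-- shared module helper (preformatted) and the f'{n:{w}}' number formatting, used by both ports
def preformatted (text : String) : String := "<pre>" ++ text ++ "</pre>"

-- f'{n:{w}}' for an int n: right-aligned in w, space fill (exact for w ≥ 0)
def gevPad (w : Int) (cs : List Char) : List Char :=
  List.replicate (w - (cs.length : Int)).toNat ' ' ++ cs

def gevLine (word : String) (lw rw lo hi : Int) : String :=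
  word ++ " " ++ String.ofList (gevPad lw (PySem.Int.toChars lo)) ++ "eV &lt; energy &lt; "
    ++ String.ofList (gevPad rw (PySem.Int.toChars hi)) ++ "eV"

-- ===== PORT A =====
-- A's for-loop over enumerate(range_def) with state (ok_bounds, bad_bounds, curr_ok, curr_bad, prev)
def gevLoopA (bitmask : Int) :
    List Int → Nat → Int → List (Int × Int) → List (Int × Int) →
    Option (Int × Int) → Option (Int × Int) → List (Int × Int) × List (Int × Int)
  | [], _, _, okb, badb, curOk, curBad =>
      (match curOk with | some c => okb ++ [c] | none => okb,
       match curBad with | some c => badb ++ [c] | none => badb)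
  | ev :: rest, bit, prev, okb, badb, curOk, curBad =>
      let ok := PySem.Int.mod (bitmask >>> bit) 2
      if ok ≠ 0 then
        gevLoopA bitmask rest (bit + 1) ev okb
          (match curBad with | some cb => badb ++ [cb] | none => badb)
          (match curOk with | none => some (prev, ev) | some c => some (c.1, ev)) none
      else
        gevLoopA bitmask rest (bit + 1) ev
          (match curOk with | some co => okb ++ [co] | none => okb) badb none
          (match curBad with | none => some (prev, ev) | some c => some (c.1, ev))

def get_ev_range_tooltip (bitmask : Int) (range_def : List Int) : String :=
  let bs := gevLoopA bitmask range_def 0 0 [] [] none none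
  let okb := bs.1
  let badb := bs.2
  if badb = [] ∨ okb.length < badb.length then
    let ws := okb.foldl (fun (w : Int × Int) p =>
      (max w.1 ((PySem.Int.toChars p.1).length : Int), max w.2 ((PySem.Int.toChars p.2).length : Int))) (0, 0)
    let lines := okb.foldl (fun ls p => ls ++ [gevLine "Allow" ws.1 ws.2 p.1 p.2]) []
    preformatted (PySem.Str.join "\n" lines)
  else
    let ws := badb.foldl (fun (w : Int × Int) p =>
      (max w.1 ((PySem.Int.toChars p.1).length : Int), max w.2 ((PySem.Int.toChars p.2).length : Int))) (0, 0)
    let lines := badb.foldl (fun ls p => ls ++ [gevLine "Block" ws.1 ws.2 p.1 p.2]) []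
    preformatted (PySem.Str.join "\n" lines)

-- ===== PORT B =====
-- Source B: flags; prevs = [0]+evs[:-1]; run boundaries by comparing flags with a shifted copy;
-- pair starts with ends by zip; arithmetic counts; only the chosen bounds list is built.
def get_ev_range_tooltip_alt (bitmask : Int) (range_def : List Int) : String :=
  let evs := range_def
  let flags := (List.range evs.length).map (fun bit : Nat => PySem.Int.mod (bitmask >>> bit) 2)
  let prevs := 0 :: PySem.List.slice evs none (some (-1))
  let is_start := true :: ((PySem.List.slice flags (some 1) none).zip flags).map (fun p => p.1 != p.2)
  let is_end := (PySem.List.slice is_start (some 1) none) ++ [true]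
  let run_starts := ((prevs.zip (is_start.zip flags)).filter (fun t => t.2.1)).map (fun t => (t.1, t.2.2))
  let run_ends := ((evs.zip is_end).filter (fun t => t.2)).map (fun t => t.1)
  let runs := (run_starts.zip run_ends).map (fun p => (p.1.1, p.2, p.1.2))
  let ok_count := (runs.map (fun r => r.2.2)).sum
  let bad_count := (runs.length : Int) - ok_count
  let ww := if bad_count = 0 ∨ ok_count < bad_count then (("Allow" : String), (1 : Int))
            else (("Block" : String), (0 : Int))
  let bounds := (runs.filter (fun r => r.2.2 == ww.2)).map (fun r => (r.1, r.2.1))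
  let left_width := (bounds.map (fun p => ((PySem.Int.toChars p.1).length : Int))).foldl max 0
  let right_width := (bounds.map (fun p => ((PySem.Int.toChars p.2).length : Int))).foldl max 0
  let lines := bounds.map (fun p => gevLine ww.1 left_width right_width p.1 p.2)
  preformatted (PySem.Str.join "\n" lines)

-- ===== PRECONDITION & SPEC =====
def Spec_get_ev_range_tooltip (bitmask : Int) (range_def : List Int) (out : String) : Prop := out = get_ev_range_tooltip_alt bitmask range_def
instance (bitmask : Int) (range_def : List Int) (out : String) : Decidable (Spec_get_ev_range_tooltip bitmask range_def out) := by unfold Spec_get_ev_range_tooltip; infer_instance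

-- ===== CLAIM (what is proved, stated in full; the proofs are below) =====
def Claim_equal_get_ev_range_tooltip : Prop := ∀ (bitmask : Int) (range_def : List Int), Dom_get_ev_range_tooltip bitmask range_def → Spec_get_ev_range_tooltip bitmask range_def (get_ev_range_tooltip bitmask range_def)

-- ===== LEMMAS AND PROOFS =====

-- entry list: (prev, ev, flag) for each ev (proof bridge shared by both sides)
def gevEntries (bitmask : Int) : List Int → Nat → Int → List (Int × Int × Int)
  | [], _, _ => []
  | ev :: rest, bit, prev =>
      (prev, ev, PySem.Int.mod (bitmask >>> bit) 2) :: gevEntries bitmask rest (bit + 1) ev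

-- itertools.groupby-style maximal runs of equal flag (proof bridge)
def gevGroupby : List (Int × Int × Int) → List (Int × List (Int × Int × Int))
  | [] => []
  | e :: es =>
      (e.2.2, e :: es.takeWhile (fun x => x.2.2 == e.2.2)) ::
        gevGroupby (es.dropWhile (fun x => x.2.2 == e.2.2))
termination_by l => l.length
decreasing_by simpa [Nat.lt_succ_iff] using List.length_dropWhile_le _ _

def gevBounds : List (Int × List (Int × Int × Int)) → List (Int × Int) → List (Int × Int) →
    List (Int × Int) × List (Int × Int)
  | [], okb, badb => (okb, badb)
  | (k, run) :: gs, okb, badb =>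
      let bound := ((run.headD (0, 0, 0)).1, (run.getLastD (0, 0, 0)).2.1)
      if k ≠ 0 then gevBounds gs (okb ++ [bound]) badb
      else gevBounds gs okb (badb ++ [bound])

-- run summary: (lo, hi, flag) of each maximal run, in order
def gevSummary (es : List (Int × Int × Int)) : List (Int × Int × Int) :=
  (gevGroupby es).map (fun g => ((g.2.headD (0, 0, 0)).1, (g.2.getLastD (0, 0, 0)).2.1, g.1))

-- A's loop re-expressed over the precomputed entry list (proof helper)
def loopE : List (Int × Int × Int) → List (Int × Int) → List (Int × Int) →
    Option (Int × Int) → Option (Int × Int) → List (Int × Int) × List (Int × Int)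
  | [], okb, badb, curOk, curBad =>
      (match curOk with | some c => okb ++ [c] | none => okb,
       match curBad with | some c => badb ++ [c] | none => badb)
  | (p, e, k) :: es, okb, badb, curOk, curBad =>
      if k ≠ 0 then
        loopE es okb (match curBad with | some cb => badb ++ [cb] | none => badb)
          (match curOk with | none => some (p, e) | some c => some (c.1, e)) none
      else
        loopE es (match curOk with | some co => okb ++ [co] | none => okb) badb none
          (match curBad with | none => some (p, e) | some c => some (c.1, e))

lemma gevLoopA_eq_loopE (bitmask : Int) (rd : List Int) :
    ∀ (bit : Nat) (prev : Int) okb badb curOk curBad,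
    gevLoopA bitmask rd bit prev okb badb curOk curBad
      = loopE (gevEntries bitmask rd bit prev) okb badb curOk curBad := by
  induction rd with
  | nil => intros; rfl
  | cons ev rest ih =>
      intro bit prev okb badb curOk curBad
      simp only [gevLoopA, gevEntries, loopE]
      by_cases h : PySem.Int.mod (bitmask >>> bit) 2 ≠ 0
      · simp only [if_pos h]; simp [ih]
      · simp only [if_neg h]; simp [ih]

lemma gevEntries_keys01 (bitmask : Int) (rd : List Int) :
    ∀ (bit : Nat) (prev : Int), ∀ x ∈ gevEntries bitmask rd bit prev, x.2.2 = 0 ∨ x.2.2 = 1 := by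
  induction rd with
  | nil => intros _ _ x hx; simp [gevEntries] at hx
  | cons ev rest ih =>
      intro bit prev x hx
      simp only [gevEntries, List.mem_cons] at hx
      rcases hx with rfl | hx
      · have h1 := PySem.Int.mod_nonneg (bitmask >>> bit) (b := 2) (by norm_num)
        have h2 := PySem.Int.mod_lt (bitmask >>> bit) (b := 2) (by norm_num)
        simp only []
        omega
      · exact ih _ _ x hx

lemma last_snd_fst (x y : Int × Int × Int) (t : List (Int × Int × Int)) (d : Int × Int × Int)
    (h : x.2.1 = y.2.1) :
    ((x :: t).getLast?.getD d).2.1 = ((y :: t).getLast?.getD d).2.1 := by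
  cases t with
  | nil => simpa using h
  | cons z t => simp [List.getLast?_cons_cons]

lemma loopE_run (es : List (Int × Int × Int)) :
    (∀ x ∈ es, x.2.2 = 0 ∨ x.2.2 = 1) → ∀ (a b : Int) okb badb,
    (loopE es okb badb (some (a, b)) none = gevBounds (gevGroupby ((a, b, 1) :: es)) okb badb)
    ∧ (loopE es okb badb none (some (a, b)) = gevBounds (gevGroupby ((a, b, 0) :: es)) okb badb) := by
  induction es with
  | nil =>
      intro _ a b okb badb
      constructor <;> simp [loopE, gevGroupby, gevBounds]
  | cons x es ih =>
      obtain ⟨p, e, k⟩ := x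
      intro hk a b okb badb
      have hx : k = 0 ∨ k = 1 := by simpa using hk (p, e, k) (List.mem_cons_self ..)
      have htail : ∀ x ∈ es, x.2.2 = 0 ∨ x.2.2 = 1 := fun x hx => hk x (List.mem_cons_of_mem _ hx)
      rcases hx with rfl | rfl
      · constructor
        · simp only [loopE, gevGroupby, gevBounds]
          simp only [List.takeWhile_cons, List.dropWhile_cons]
          norm_num
          exact (ih htail p e (okb ++ [(a, b)]) badb).2
        · simp only [loopE]
          norm_num
          rw [(ih htail a e okb badb).2]
          simp only [gevGroupby, gevBounds, List.takeWhile_cons, List.dropWhile_cons]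
          norm_num [List.getLastD_cons]
          rw [last_snd_fst (a, e, 0) (p, e, 0) (List.takeWhile (fun x => x.2.2 == 0) es) (0, 0, 0) rfl]
      · constructor
        · simp only [loopE]
          norm_num
          rw [(ih htail a e okb badb).1]
          simp only [gevGroupby, gevBounds, List.takeWhile_cons, List.dropWhile_cons]
          norm_num [List.getLastD_cons]
          rw [last_snd_fst (a, e, 1) (p, e, 1) (List.takeWhile (fun x => x.2.2 == 1) es) (0, 0, 0) rfl]
        · simp only [loopE, gevGroupby, gevBounds]
          simp only [List.takeWhile_cons, List.dropWhile_cons]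
          norm_num
          exact (ih htail p e okb (badb ++ [(a, b)])).1

lemma loopE_eq_bounds (es : List (Int × Int × Int))
    (hk : ∀ x ∈ es, x.2.2 = 0 ∨ x.2.2 = 1) (okb badb : List (Int × Int)) :
    loopE es okb badb none none = gevBounds (gevGroupby es) okb badb := by
  cases es with
  | nil => simp [loopE, gevGroupby, gevBounds]
  | cons x es =>
      obtain ⟨p, e, k⟩ := x
      have hx : k = 0 ∨ k = 1 := by simpa using hk (p, e, k) (List.mem_cons_self ..)
      have htail : ∀ x ∈ es, x.2.2 = 0 ∨ x.2.2 = 1 := fun x h => hk x (List.mem_cons_of_mem _ h)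
      rcases hx with rfl | rfl
      · simpa [loopE] using (loopE_run es htail p e okb badb).2
      · simpa [loopE] using (loopE_run es htail p e okb badb).1

-- gevBounds in terms of the run summary
lemma gevBounds_eq (gs : List (Int × List (Int × Int × Int))) :
    ∀ okb badb, gevBounds gs okb badb
      = (okb ++ ((gs.map (fun g => ((g.2.headD (0,0,0)).1, (g.2.getLastD (0,0,0)).2.1, g.1))).filter
            (fun r => r.2.2 != 0)).map (fun r => (r.1, r.2.1)),
         badb ++ ((gs.map (fun g => ((g.2.headD (0,0,0)).1, (g.2.getLastD (0,0,0)).2.1, g.1))).filter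
            (fun r => r.2.2 == 0)).map (fun r => (r.1, r.2.1))) := by
  induction gs with
  | nil => intro okb badb; simp [gevBounds]
  | cons g gs ih =>
      obtain ⟨k, run⟩ := g
      intro okb badb
      by_cases hk : k ≠ 0
      · simp only [gevBounds, if_pos hk, ih]
        simp [hk]
      · simp only [ne_eq, Decidable.not_not] at hk
        subst hk
        simp [gevBounds, ih]

-- ===== B-side bridges: the zip pipeline equals recursive run extraction =====

-- flag-change markers: goNe p xs = [x.flag != prev.flag for consecutive elements]
def goNe : (Int × Int × Int) → List (Int × Int × Int) → List Bool
  | _, [] => []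
  | p, x :: xs => (x.2.2 != p.2.2) :: goNe x xs

-- recursive run starts (lo, flag) and run ends (hi)
def rsTail : (Int × Int × Int) → List (Int × Int × Int) → List (Int × Int)
  | _, [] => []
  | p, x :: xs => if x.2.2 != p.2.2 then (x.1, x.2.2) :: rsTail x xs else rsTail x xs

def reTail : (Int × Int × Int) → List (Int × Int × Int) → List Int
  | p, [] => [p.2.1]
  | p, x :: xs => if x.2.2 != p.2.2 then p.2.1 :: reTail x xs else reTail x xs

def rsE : List (Int × Int × Int) → List (Int × Int)
  | [] => []
  | e :: t => (e.1, e.2.2) :: rsTail e t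

def reE : List (Int × Int × Int) → List Int
  | [] => []
  | e :: t => reTail e t

lemma adj_eq_goNe (e : Int × Int × Int) (t : List (Int × Int × Int)) :
    ((t.map (fun x => x.2.2)).zip ((e :: t).map (fun x => x.2.2))).map (fun p => p.1 != p.2)
      = goNe e t := by
  induction t generalizing e with
  | nil => rfl
  | cons x xs ih =>
      have h := ih x
      simp only [List.map_cons] at h
      simp [goNe, h]

lemma rs_pipeline (p : Int × Int × Int) (t : List (Int × Int × Int)) :
    (((t.map (fun x => x.1)).zip ((goNe p t).zip (t.map (fun x => x.2.2)))).filter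
        (fun x => x.2.1)).map (fun x => (x.1, x.2.2)) = rsTail p t := by
  induction t generalizing p with
  | nil => rfl
  | cons x xs ih =>
      have h' := ih x
      simp only [List.map_cons, goNe, List.zip_cons_cons, List.filter_cons, rsTail]
      by_cases h : (x.2.2 != p.2.2) = true
      · simp [h, h']
      · simp [h, h']

lemma re_pipeline (p : Int × Int × Int) (t : List (Int × Int × Int)) :
    ((((p :: t).map (fun x => x.2.1)).zip (goNe p t ++ [true])).filter
        (fun x => x.2)).map (fun x => x.1) = reTail p t := by
  induction t generalizing p with
  | nil => rfl
  | cons x xs ih =>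
      have h' := ih x
      simp only [List.map_cons] at h'
      simp only [List.map_cons, goNe, List.cons_append, List.zip_cons_cons, List.filter_cons, reTail]
      by_cases h : (x.2.2 != p.2.2) = true
      · simp [h, h']
      · simp [h, h']

-- skipping a constant-flag run
lemma rsTail_run (tk : List (Int × Int × Int)) :
    ∀ (p : Int × Int × Int) (rest : List (Int × Int × Int)),
    (∀ x ∈ tk, x.2.2 = p.2.2) →
    (rest = [] ∨ ∃ r rs, rest = r :: rs ∧ r.2.2 ≠ ((p :: tk).getLastD (0,0,0)).2.2) →
    rsTail p (tk ++ rest) = rsE rest := by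
  induction tk with
  | nil =>
      intro p rest _ hrest
      rcases hrest with rfl | ⟨r, rs, rfl, hne⟩
      · rfl
      · simp only [List.getLastD_cons] at hne
        simp [rsTail, rsE, show (r.2.2 != p.2.2) = true by simpa using hne]
  | cons x xs ih =>
      intro p rest hall hrest
      have hx : x.2.2 = p.2.2 := hall x (List.mem_cons_self ..)
      have hall' : ∀ y ∈ xs, y.2.2 = x.2.2 := fun y hy => (hall y (List.mem_cons_of_mem _ hy)).trans hx.symm
      have hlast : ((x :: xs).getLastD (0,0,0)) = ((p :: x :: xs).getLastD (0,0,0)) := by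
        simp
      simp only [List.cons_append, rsTail, show (x.2.2 != p.2.2) = false by simpa using hx]
      exact ih x rest hall' (by rw [hlast]; exact hrest)

lemma reTail_run (tk : List (Int × Int × Int)) :
    ∀ (p : Int × Int × Int) (rest : List (Int × Int × Int)),
    (∀ x ∈ tk, x.2.2 = p.2.2) →
    (rest = [] ∨ ∃ r rs, rest = r :: rs ∧ r.2.2 ≠ ((p :: tk).getLastD (0,0,0)).2.2) →
    reTail p (tk ++ rest) = ((p :: tk).getLastD (0,0,0)).2.1 :: reE rest := by
  induction tk with
  | nil =>
      intro p rest _ hrest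
      rcases hrest with rfl | ⟨r, rs, rfl, hne⟩
      · rfl
      · simp only [List.getLastD_cons] at hne ⊢
        simp [reTail, reE, show (r.2.2 != p.2.2) = true by simpa using hne]
  | cons x xs ih =>
      intro p rest hall hrest
      have hx : x.2.2 = p.2.2 := hall x (List.mem_cons_self ..)
      have hall' : ∀ y ∈ xs, y.2.2 = x.2.2 := fun y hy => (hall y (List.mem_cons_of_mem _ hy)).trans hx.symm
      have hlast : ((x :: xs).getLastD (0,0,0)) = ((p :: x :: xs).getLastD (0,0,0)) := by
        simp
      simp only [List.cons_append, reTail, show (x.2.2 != p.2.2) = false by simpa using hx]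
      rw [ih x rest hall' (by rw [hlast]; exact hrest), hlast]
      simp

-- the default-valued getLast of a cons list is a member
lemma getLastD_mem_cons (e : Int × Int × Int) (tk : List (Int × Int × Int)) :
    (e :: tk).getLastD (0,0,0) ∈ e :: tk := by
  rw [List.getLastD_eq_getLast?, List.getLast?_eq_some_getLast (by simp)]
  exact List.getLast_mem _

-- main: paired starts/ends are exactly the run summary
lemma runs_eq_summary (es : List (Int × Int × Int)) :
    ((rsE es).zip (reE es)).map (fun p => (p.1.1, p.2, p.1.2)) = gevSummary es := by
  induction es using gevGroupby.induct with
  | case1 => simp [rsE, reE, gevSummary, gevGroupby]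
  | case2 e t ih =>
      have hsplit : t.takeWhile (fun x => x.2.2 == e.2.2) ++ t.dropWhile (fun x => x.2.2 == e.2.2) = t :=
        List.takeWhile_append_dropWhile ..
      have hall : ∀ x ∈ t.takeWhile (fun x => x.2.2 == e.2.2), x.2.2 = e.2.2 := by
        intro x hx
        simpa using List.mem_takeWhile_imp hx
      have hlastflag : ((e :: t.takeWhile (fun x => x.2.2 == e.2.2)).getLastD (0,0,0)).2.2 = e.2.2 := by
        have hmem := getLastD_mem_cons e (t.takeWhile (fun x => x.2.2 == e.2.2))
        rcases List.mem_cons.mp hmem with hh | hh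
        · rw [hh]
        · exact hall _ hh
      have hrest : t.dropWhile (fun x => x.2.2 == e.2.2) = [] ∨
          ∃ r rs, t.dropWhile (fun x => x.2.2 == e.2.2) = r :: rs ∧
            r.2.2 ≠ ((e :: t.takeWhile (fun x => x.2.2 == e.2.2)).getLastD (0,0,0)).2.2 := by
        cases hd : t.dropWhile (fun x => x.2.2 == e.2.2) with
        | nil => exact Or.inl rfl
        | cons r rs =>
            refine Or.inr ⟨r, rs, rfl, ?_⟩
            have hhd := List.head?_dropWhile_not (fun x : Int × Int × Int => x.2.2 == e.2.2) t
            rw [hd] at hhd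
            rw [hlastflag]
            simpa using hhd
      have hrs : rsTail e t = rsE (t.dropWhile (fun x => x.2.2 == e.2.2)) := by
        conv_lhs => rw [← hsplit]
        exact rsTail_run _ e _ hall hrest
      have hre : reTail e t
          = ((e :: t.takeWhile (fun x => x.2.2 == e.2.2)).getLastD (0,0,0)).2.1
              :: reE (t.dropWhile (fun x => x.2.2 == e.2.2)) := by
        conv_lhs => rw [← hsplit]
        exact reTail_run _ e _ hall hrest
      show ((((e.1, e.2.2) :: rsTail e t)).zip (reTail e t)).map (fun p => (p.1.1, p.2, p.1.2))
          = gevSummary (e :: t)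
      have hG : gevGroupby (e :: t)
          = (e.2.2, e :: t.takeWhile (fun x => x.2.2 == e.2.2))
              :: gevGroupby (t.dropWhile (fun x => x.2.2 == e.2.2)) := by
        rw [gevGroupby]
      rw [hrs, hre]
      simp only [List.zip_cons_cons, List.map_cons, ih]
      unfold gevSummary
      rw [hG]
      simp [List.getLastD_eq_getLast?]

-- entry-list projections
lemma gevEntries_map_ev (bitmask : Int) (rd : List Int) :
    ∀ bit prev, (gevEntries bitmask rd bit prev).map (fun x => x.2.1) = rd := by
  induction rd with
  | nil => intros; rfl
  | cons e rest ih => intro bit prev; simp [gevEntries, ih]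

lemma gevEntries_map_prev (bitmask : Int) (rd : List Int) :
    ∀ bit prev, (gevEntries bitmask rd bit prev).map (fun x => x.1) = (prev :: rd).dropLast := by
  induction rd with
  | nil => intros; rfl
  | cons e rest ih =>
      intro bit prev
      cases rest with
      | nil => simp [gevEntries]
      | cons f r =>
          have h := ih (bit + 1) e
          simp only [gevEntries, List.map_cons] at h ⊢
          rw [h]
          simp

lemma gevEntries_map_flag (bitmask : Int) (rd : List Int) :
    ∀ bit prev, (gevEntries bitmask rd bit prev).map (fun x => x.2.2)
      = (List.range' bit rd.length).map (fun i : Nat => PySem.Int.mod (bitmask >>> i) 2) := by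
  induction rd with
  | nil => intros; rfl
  | cons e rest ih =>
      intro bit prev
      have h := ih (bit + 1) e
      simp only [gevEntries, List.map_cons, List.length_cons, List.range'_succ]
      rw [h]

-- 0/1-flag counting
lemma sum_flags_eq (runs : List (Int × Int × Int))
    (h01 : ∀ r ∈ runs, r.2.2 = 0 ∨ r.2.2 = 1) :
    (runs.map (fun r => r.2.2)).sum = ((runs.filter (fun r => r.2.2 != 0)).length : Int)
    ∧ (runs.length : Int) - (runs.map (fun r => r.2.2)).sum
        = ((runs.filter (fun r => r.2.2 == 0)).length : Int) := by
  induction runs with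
  | nil => simp
  | cons r rs ih =>
      have hr := h01 r (List.mem_cons_self ..)
      have htail := ih (fun x hx => h01 x (List.mem_cons_of_mem _ hx))
      rcases hr with h | h <;>
        simp [List.filter_cons, h, htail.1, htail.2] <;> omega

lemma widths_pair (l : List (Int × Int)) (w1 w2 : Int) :
    l.foldl (fun (w : Int × Int) p =>
      (max w.1 ((PySem.Int.toChars p.1).length : Int), max w.2 ((PySem.Int.toChars p.2).length : Int))) (w1, w2)
    = (l.foldl (fun w p => max w ((PySem.Int.toChars p.1).length : Int)) w1,
       l.foldl (fun w p => max w ((PySem.Int.toChars p.2).length : Int)) w2) := by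
  induction l generalizing w1 w2 with
  | nil => rfl
  | cons x l ih => simp [List.foldl_cons, ih]

lemma format_eq (word : String) (bounds : List (Int × Int)) :
    bounds.foldl (fun ls p => ls ++ [gevLine word
        (bounds.foldl (fun (w : Int × Int) p =>
          (max w.1 ((PySem.Int.toChars p.1).length : Int), max w.2 ((PySem.Int.toChars p.2).length : Int))) (0, 0)).1
        (bounds.foldl (fun (w : Int × Int) p =>
          (max w.1 ((PySem.Int.toChars p.1).length : Int), max w.2 ((PySem.Int.toChars p.2).length : Int))) (0, 0)).2
        p.1 p.2]) []
    = bounds.map (fun p => gevLine word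
        ((bounds.map (fun p => ((PySem.Int.toChars p.1).length : Int))).foldl max 0)
        ((bounds.map (fun p => ((PySem.Int.toChars p.2).length : Int))).foldl max 0)
        p.1 p.2) := by
  rw [widths_pair, List.foldl_map, List.foldl_map]
  simpa using PySem.List.foldl_append_singleton_eq_map
    (fun p : Int × Int => gevLine word
      (bounds.foldl (fun w p => max w ((PySem.Int.toChars p.1).length : Int)) 0)
      (bounds.foldl (fun w p => max w ((PySem.Int.toChars p.2).length : Int)) 0)
      p.1 p.2) bounds []

lemma rsTail_flags (t : List (Int × Int × Int)) :
    ∀ p q, q ∈ rsTail p t → ∃ x ∈ t, q.2 = x.2.2 := by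
  induction t with
  | nil => intro p q h; simp [rsTail] at h
  | cons x xs ih =>
      intro p q h
      rw [rsTail] at h
      by_cases hb : (x.2.2 != p.2.2) = true
      · rw [if_pos hb] at h
        rcases List.mem_cons.mp h with rfl | h
        · exact ⟨x, List.mem_cons_self .., rfl⟩
        · obtain ⟨y, hy, hq⟩ := ih x q h
          exact ⟨y, List.mem_cons_of_mem _ hy, hq⟩
      · rw [if_neg hb] at h
        obtain ⟨y, hy, hq⟩ := ih x q h
        exact ⟨y, List.mem_cons_of_mem _ hy, hq⟩

lemma summary_keys01 (bitmask : Int) (rd : List Int) :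
    ∀ r ∈ gevSummary (gevEntries bitmask rd 0 0), r.2.2 = 0 ∨ r.2.2 = 1 := by
  intro r hr
  rw [← runs_eq_summary] at hr
  simp only [List.mem_map] at hr
  obtain ⟨p, hp, rfl⟩ := hr
  have h1 : p.1 ∈ rsE (gevEntries bitmask rd 0 0) := (List.of_mem_zip hp).1
  have hex : ∃ x ∈ gevEntries bitmask rd 0 0, p.1.2 = x.2.2 := by
    cases hes : gevEntries bitmask rd 0 0 with
    | nil => rw [hes] at h1; simp [rsE] at h1
    | cons e t =>
        rw [hes, rsE] at h1
        rcases List.mem_cons.mp h1 with hh | hh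
        · exact ⟨e, List.mem_cons_self .., by rw [hh]⟩
        · obtain ⟨y, hy, hq⟩ := rsTail_flags t e p.1 hh
          exact ⟨y, List.mem_cons_of_mem _ hy, hq⟩
  obtain ⟨x, hx, hq⟩ := hex
  rw [show ((p.1.1, p.2, p.1.2) : Int × Int × Int).2.2 = p.1.2 from rfl, hq]
  exact gevEntries_keys01 bitmask rd 0 0 x hx

lemma gevBounds_groupby (es : List (Int × Int × Int)) :
    gevBounds (gevGroupby es) [] []
      = (((gevSummary es).filter (fun r => r.2.2 != 0)).map (fun r => (r.1, r.2.1)),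
         ((gevSummary es).filter (fun r => r.2.2 == 0)).map (fun r => (r.1, r.2.1))) := by
  simpa [gevSummary] using gevBounds_eq (gevGroupby es) [] []

-- the tail of B (selection + formatting) expressed on the run summary
def gevFinish (S : List (Int × Int × Int)) : String :=
  let ok_count := (S.map (fun r => r.2.2)).sum
  let bad_count := (S.length : Int) - ok_count
  let ww := if bad_count = 0 ∨ ok_count < bad_count then (("Allow" : String), (1 : Int))
            else (("Block" : String), (0 : Int))
  let bounds := (S.filter (fun r => r.2.2 == ww.2)).map (fun r => (r.1, r.2.1))
  let left_width := (bounds.map (fun p => ((PySem.Int.toChars p.1).length : Int))).foldl max 0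
  let right_width := (bounds.map (fun p => ((PySem.Int.toChars p.2).length : Int))).foldl max 0
  preformatted (PySem.Str.join "\n" (bounds.map (fun p => gevLine ww.1 left_width right_width p.1 p.2)))

-- B's pipeline reduces to gevFinish of the run summary
lemma alt_core (bitmask : Int) (rd : List Int) (e : Int × Int × Int) (t : List (Int × Int × Int))
    (h : gevEntries bitmask rd 0 0 = e :: t) :
    get_ev_range_tooltip_alt bitmask rd = gevFinish (gevSummary (e :: t)) := by
  cases rd with
  | nil => simp [gevEntries] at h
  | cons r0 rtl =>
  have hflag : (List.range (r0 :: rtl).length).map (fun bit : Nat => PySem.Int.mod (bitmask >>> bit) 2)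
      = (e :: t).map (fun x => x.2.2) := by
    rw [← h, gevEntries_map_flag, List.range_eq_range']
  have hprev : (0 : Int) :: (r0 :: rtl).dropLast = (e :: t).map (fun x => x.1) := by
    rw [← h, gevEntries_map_prev]
    rfl
  have hev : r0 :: rtl = (e :: t).map (fun x => x.2.1) := by
    rw [← h, gevEntries_map_ev]
  have hadj := adj_eq_goNe e t
  have hrs := rs_pipeline e t
  have hre := re_pipeline e t
  simp only [List.map_cons] at hadj hre hflag hprev hev
  simp only [get_ev_range_tooltip_alt]
  rw [PySem.List.slice_to_neg_one]
  simp only [PySem.List.slice_from_one]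
  rw [hflag, hprev]
  conv_lhs => rw [hev]
  simp only [List.tail_cons, hadj, List.zip_cons_cons, List.filter_cons]
  simp only [if_true, List.map_cons]
  rw [hrs, hre]
  have hfold : ((e.1, e.2.2) :: rsTail e t).zip (reTail e t) = (rsE (e :: t)).zip (reE (e :: t)) := rfl
  rw [hfold, runs_eq_summary]
  rfl

-- ===== VERDICT (by name: the statement is the Claim_ definition above) =====
theorem get_ev_range_tooltip_spec : Claim_equal_get_ev_range_tooltip := by
  intro bitmask range_def _
  show get_ev_range_tooltip bitmask range_def = get_ev_range_tooltip_alt bitmask range_def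
  cases range_def with
  | nil => rfl
  | cons r0 rtl =>
  cases hes : gevEntries bitmask (r0 :: rtl) 0 0 with
  | nil => exact absurd hes (by simp [gevEntries])
  | cons e t =>
  rw [alt_core bitmask (r0 :: rtl) e t hes]
  have h01 := summary_keys01 bitmask (r0 :: rtl)
  rw [hes] at h01
  simp only [get_ev_range_tooltip]
  rw [gevLoopA_eq_loopE, loopE_eq_bounds _ (gevEntries_keys01 bitmask (r0 :: rtl) 0 0), hes,
    gevBounds_groupby]
  have hsum := sum_flags_eq (gevSummary (e :: t)) h01
  simp only [gevFinish]
  by_cases hA : ((gevSummary (e :: t)).filter (fun r => r.2.2 == 0)).map (fun r => (r.1, r.2.1)) = []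
      ∨ (((gevSummary (e :: t)).filter (fun r => r.2.2 != 0)).map (fun r => (r.1, r.2.1))).length
          < (((gevSummary (e :: t)).filter (fun r => r.2.2 == 0)).map (fun r => (r.1, r.2.1))).length
  · have hB : ((gevSummary (e :: t)).length : Int) - ((gevSummary (e :: t)).map (fun r => r.2.2)).sum = 0
        ∨ ((gevSummary (e :: t)).map (fun r => r.2.2)).sum
            < ((gevSummary (e :: t)).length : Int) - ((gevSummary (e :: t)).map (fun r => r.2.2)).sum := by
      rw [hsum.2, hsum.1]
      rcases hA with hh | hh
      · left
        have := congrArg List.length hh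
        simp only [List.length_map] at this
        simp [this]
      · right
        simp only [List.length_map] at hh
        exact_mod_cast hh
    rw [if_pos hA, if_pos hB, format_eq]
    have hfil : (gevSummary (e :: t)).filter (fun r => r.2.2 == (1 : Int))
        = (gevSummary (e :: t)).filter (fun r => r.2.2 != 0) := by
      apply List.filter_congr
      intro x hx
      rcases h01 x hx with hh | hh <;> simp [hh]
    rw [hfil]
  · have hB : ¬ (((gevSummary (e :: t)).length : Int) - ((gevSummary (e :: t)).map (fun r => r.2.2)).sum = 0
        ∨ ((gevSummary (e :: t)).map (fun r => r.2.2)).sum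
            < ((gevSummary (e :: t)).length : Int) - ((gevSummary (e :: t)).map (fun r => r.2.2)).sum) := by
      rw [hsum.2, hsum.1]
      intro hcon
      apply hA
      rcases hcon with hh | hh
      · left
        have : ((gevSummary (e :: t)).filter (fun r => r.2.2 == 0)).length = 0 := by exact_mod_cast hh
        simp [List.length_eq_zero_iff.mp this]
      · right
        simp only [List.length_map]
        exact_mod_cast hh
    rw [if_neg hA, if_neg hB, format_eq]
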